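-- pv_equiv track=rewrite | github.com/DigitalKin-ai/kinos | suivi_agent.py | _clean_old_entries
-- ===== SOURCE A (Python) =====
-- def _clean_old_entries(content: str, max_entries: int = 100) -> str:
--     """Keep only the most recent entries"""
--     lines = content.split('\n')
--     entries = []
--     current_entry = []
--
--     for line in lines:
--         if line.startswith('[') and ']' in line:
--             if current_entry:
--                 entries.append('\n'.join(current_entry))
--             current_entry = [line]
--         elif current_entry:
--             current_entry.append(line)
--
--     if current_entry:
--         entries.append('\n'.join(current_entry))
--
--     # Keep only the most recent entries
--     recent_entries = entries[-max_entries:] if entries else []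
--     return '\n'.join(recent_entries)
-- ===== SOURCE B (Python) =====
-- def _clean_old_entries(content: str, max_entries: int = 100) -> str:
--     """Keep only the most recent entries"""
--     lines = content.split('\n')
--     header_indices = [i for i, line in enumerate(lines)
--                       if line.startswith('[') and ']' in line]
--     selected = header_indices[-max_entries:]
--     if not selected:
--         return ''
--     return '\n'.join(lines[selected[0]:])
-- ===== Notes on version B (the rewrite author's own statement) =====
-- stated objective: simpler
-- what changed: Instead of accumulating per-entry line groups and re-joining each entry before a final join, B collects the indices of header lines in one comprehension and returns the lines from the selected header onward, joined once.
import Mathlib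
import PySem

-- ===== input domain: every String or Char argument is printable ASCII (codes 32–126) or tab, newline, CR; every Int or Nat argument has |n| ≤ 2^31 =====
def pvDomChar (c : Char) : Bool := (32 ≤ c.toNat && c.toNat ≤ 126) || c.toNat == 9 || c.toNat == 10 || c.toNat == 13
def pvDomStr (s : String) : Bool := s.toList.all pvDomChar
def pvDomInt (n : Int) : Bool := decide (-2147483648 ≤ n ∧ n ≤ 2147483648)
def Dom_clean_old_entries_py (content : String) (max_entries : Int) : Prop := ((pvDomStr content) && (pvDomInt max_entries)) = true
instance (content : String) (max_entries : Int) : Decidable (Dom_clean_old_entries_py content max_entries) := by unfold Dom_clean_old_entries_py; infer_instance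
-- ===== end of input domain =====

-- B replaces A's per-entry group accumulation by collecting header-line indices and
-- joining all lines from the selected header onward (objective: simpler).

-- ===== PORT A =====
def clean_old_entries_py (content : String) (max_entries : Int) : String :=
  let lines := (PySem.Str.split? content "\n").getD []
  let st := lines.foldl (fun (s : List String × List String) line =>
    if PySem.Str.startswith line "[" && PySem.Str.isIn "]" line then
      if !s.2.isEmpty then (s.1 ++ [PySem.Str.join "\n" s.2], [line]) else (s.1, [line])
    else if !s.2.isEmpty then (s.1, s.2 ++ [line]) else s) ([], [])
  let entries := if !st.2.isEmpty then st.1 ++ [PySem.Str.join "\n" st.2] else st.1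
  let recent := if !entries.isEmpty then PySem.List.slice entries (some (-max_entries)) none else []
  PySem.Str.join "\n" recent

-- ===== PORT B =====
def clean_old_entries_py_alt (content : String) (max_entries : Int) : String :=
  let lines := (PySem.Str.split? content "\n").getD []
  let header_indices := (PySem.List.enumerate lines 0).filterMap (fun p =>
    if PySem.Str.startswith p.2 "[" && PySem.Str.isIn "]" p.2 then some p.1 else none)
  let selected := PySem.List.slice header_indices (some (-max_entries)) none
  match selected with
  | [] => ""
  | i :: _ => PySem.Str.join "\n" (PySem.List.slice lines (some i) none)

-- ===== PRECONDITION & SPEC =====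
def Spec_clean_old_entries_py (content : String) (max_entries : Int) (out : String) : Prop := out = clean_old_entries_py_alt content max_entries
instance (content : String) (max_entries : Int) (out : String) : Decidable (Spec_clean_old_entries_py content max_entries out) := by unfold Spec_clean_old_entries_py; infer_instance

-- ===== CLAIM (what is proved, stated in full; the proofs are below) =====
def Claim_equal_clean_old_entries_py : Prop := ∀ (content : String) (max_entries : Int), Dom_clean_old_entries_py content max_entries → Spec_clean_old_entries_py content max_entries (clean_old_entries_py content max_entries)

-- ===== LEMMAS AND PROOFS =====

-- header-line test shared by both Python programs
def pvHdr (l : String) : Bool := PySem.Str.startswith l "[" && PySem.Str.isIn "]" l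

-- the groups of lines A's loop forms: a pending (nonempty) current group C, then the rest
def pvGroups : List String → List String → List (List String)
  | [], [] => []
  | [], c :: C => [c :: C]
  | l :: ls, [] => if pvHdr l then pvGroups ls [l] else pvGroups ls []
  | l :: ls, c :: C => if pvHdr l then (c :: C) :: pvGroups ls [l] else pvGroups ls (c :: (C ++ [l]))

-- the suffixes of the line list that start at a header line
def pvHsuf : List String → List (List String)
  | [] => []
  | l :: ls => if pvHdr l then (l :: ls) :: pvHsuf ls else pvHsuf ls

-- B's header-index list (identical to the filterMap in the port of B)
def pvIdx (ls : List String) (k : Int) : List Int :=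
  (PySem.List.enumerate ls k).filterMap (fun p =>
    if PySem.Str.startswith p.2 "[" && PySem.Str.isIn "]" p.2 then some p.1 else none)

-- ---- char-level join algebra ----

lemma pvJoinC_append (nl : List Char) (xs ys : List (List Char)) (hx : xs ≠ []) (hy : ys ≠ []) :
    PySem.Chars.join nl (xs ++ ys) = PySem.Chars.join nl xs ++ nl ++ PySem.Chars.join nl ys := by
  induction xs with
  | nil => exact absurd rfl hx
  | cons x xs ih =>
    cases xs with
    | nil =>
      cases ys with
      | nil => exact absurd rfl hy
      | cons y ys => simp [PySem.Chars.join_singleton, PySem.Chars.join_cons_cons]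
    | cons x' xs' =>
      have h := ih (by simp)
      calc PySem.Chars.join nl ((x :: x' :: xs') ++ ys)
          = x ++ nl ++ PySem.Chars.join nl ((x' :: xs') ++ ys) := by
            simpa using PySem.Chars.join_cons_cons nl x x' (xs' ++ ys)
        _ = x ++ nl ++ (PySem.Chars.join nl (x' :: xs') ++ nl ++ PySem.Chars.join nl ys) := by rw [h]
        _ = PySem.Chars.join nl (x :: x' :: xs') ++ nl ++ PySem.Chars.join nl ys := by
            rw [PySem.Chars.join_cons_cons]; simp [List.append_assoc]

lemma pvJoinC_flat (nl : List Char) (gs : List (List (List Char))) (h : ∀ g ∈ gs, g ≠ []) :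
    PySem.Chars.join nl (gs.map (PySem.Chars.join nl)) = PySem.Chars.join nl gs.flatten := by
  induction gs with
  | nil => simp [PySem.Chars.join_nil]
  | cons g gs ih =>
    cases gs with
    | nil => simp [PySem.Chars.join_singleton]
    | cons g' gs' =>
      have hg : g ≠ [] := h g (by simp)
      have hflat : (g' :: gs').flatten ≠ [] := by
        have hg' : g' ≠ [] := h g' (by simp)
        cases g' with
        | nil => exact absurd rfl hg'
        | cons a t => simp
      have ih' := ih (fun g hgm => h g (by simp [hgm]))
      calc PySem.Chars.join nl ((g :: g' :: gs').map (PySem.Chars.join nl))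
          = PySem.Chars.join nl g ++ nl ++ PySem.Chars.join nl ((g' :: gs').map (PySem.Chars.join nl)) := by
            simpa using PySem.Chars.join_cons_cons nl (PySem.Chars.join nl g) (PySem.Chars.join nl g') (gs'.map (PySem.Chars.join nl))
        _ = PySem.Chars.join nl g ++ nl ++ PySem.Chars.join nl (g' :: gs').flatten := by rw [ih']
        _ = PySem.Chars.join nl (g ++ (g' :: gs').flatten) := (pvJoinC_append nl g _ hg hflat).symm
        _ = PySem.Chars.join nl (g :: g' :: gs').flatten := by simp

lemma pvJoinS_flat (gs : List (List String)) (h : ∀ g ∈ gs, g ≠ []) :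
    PySem.Str.join "\n" (gs.map (PySem.Str.join "\n")) = PySem.Str.join "\n" gs.flatten := by
  apply String.toList_inj.mp
  rw [PySem.Str.toList_join, PySem.Str.toList_join, List.map_map]
  have hmap : gs.map (String.toList ∘ PySem.Str.join "\n")
      = (gs.map (List.map String.toList)).map (PySem.Chars.join "\n".toList) := by
    rw [List.map_map]
    exact List.map_congr_left (fun g _ => PySem.Str.toList_join "\n" g)
  rw [hmap, pvJoinC_flat "\n".toList _ (by
    intro gc hgc
    rcases List.mem_map.mp hgc with ⟨g, hgm, rfl⟩
    simpa using h g hgm)]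
  rw [← List.map_flatten]

-- ---- group structure lemmas ----

lemma pvGroups_mem_ne : ∀ (ls C : List String), ∀ e ∈ pvGroups ls C, e ≠ [] := by
  intro ls
  induction ls with
  | nil =>
    intro C e he
    cases C with
    | nil => simp [pvGroups] at he
    | cons c C => simp [pvGroups] at he; simp [he]
  | cons l ls ih =>
    intro C e he
    cases C with
    | nil =>
      by_cases h : pvHdr l <;> simp [pvGroups, h] at he <;> exact ih _ _ he
    | cons c C =>
      by_cases h : pvHdr l
      · simp [pvGroups, h] at he
        rcases he with he | he
        · simp [he]
        · exact ih _ _ he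
      · simp [pvGroups, h] at he
        exact ih _ _ he

lemma pvGroups_cons : ∀ (ls : List String) (c : String) (C : List String),
    ∃ e, pvGroups ls (c :: C) = e :: pvGroups ls [] := by
  intro ls
  induction ls with
  | nil => intro c C; exact ⟨c :: C, by simp [pvGroups]⟩
  | cons l ls ih =>
    intro c C
    by_cases h : pvHdr l
    · exact ⟨c :: C, by simp [pvGroups, h]⟩
    · rcases ih c (C ++ [l]) with ⟨e, he⟩
      exact ⟨e, by simp [pvGroups, h, he]⟩

lemma pvGroups_flatten : ∀ (ls : List String) (c : String) (C : List String),
    (pvGroups ls (c :: C)).flatten = (c :: C) ++ ls := by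
  intro ls
  induction ls with
  | nil => intro c C; simp [pvGroups]
  | cons l ls ih =>
    intro c C
    by_cases h : pvHdr l
    · simp [pvGroups, h, ih l []]
    · simpa [pvGroups, h] using (ih c (C ++ [l]))

lemma pvGroups_len : ∀ ls : List String, (pvGroups ls []).length = (pvHsuf ls).length := by
  intro ls
  induction ls with
  | nil => simp [pvGroups, pvHsuf]
  | cons l ls ih =>
    by_cases h : pvHdr l
    · rcases pvGroups_cons ls l [] with ⟨e, he⟩
      simp [pvGroups, pvHsuf, h, he, ih]
    · simp [pvGroups, pvHsuf, h, ih]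

-- A's loop state, finalized, yields exactly the joined groups
lemma pvA_fold : ∀ (ls E C : List String),
    (let r := ls.foldl (fun (s : List String × List String) line =>
        if PySem.Str.startswith line "[" && PySem.Str.isIn "]" line then
          if !s.2.isEmpty then (s.1 ++ [PySem.Str.join "\n" s.2], [line]) else (s.1, [line])
        else if !s.2.isEmpty then (s.1, s.2 ++ [line]) else s) (E, C);
      if !r.2.isEmpty then r.1 ++ [PySem.Str.join "\n" r.2] else r.1)
    = E ++ (pvGroups ls C).map (PySem.Str.join "\n") := by
  intro ls
  induction ls with
  | nil =>
    intro E C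
    cases C with
    | nil => simp [pvGroups]
    | cons c C => simp [pvGroups]
  | cons l ls ih =>
    intro E C
    by_cases h : pvHdr l
    · have hb : (PySem.Str.startswith l "[" && PySem.Str.isIn "]" l) = true := h
      cases C with
      | nil => simp only [List.foldl_cons, hb]; simpa [pvGroups, h] using ih E [l]
      | cons c C =>
        simp only [List.foldl_cons, hb]
        simpa [pvGroups, h] using ih (E ++ [PySem.Str.join "\n" (c :: C)]) [l]
    · have hb : (PySem.Str.startswith l "[" && PySem.Str.isIn "]" l) = false := by
        simpa [pvHdr] using h
      cases C with
      | nil => simp only [List.foldl_cons, hb]; simpa [pvGroups, h] using ih E []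
      | cons c C =>
        simp only [List.foldl_cons, hb]
        simpa [pvGroups, h] using ih E (c :: (C ++ [l]))

-- join of the groups from index d on = join of the lines from the d-th header suffix on
lemma pvL2 : ∀ (ls : List String) (d : Nat),
    PySem.Str.join "\n" (((pvGroups ls []).drop d).map (PySem.Str.join "\n"))
    = (match (pvHsuf ls).drop d with
       | [] => ""
       | s :: _ => PySem.Str.join "\n" s) := by
  intro ls
  induction ls with
  | nil => intro d; simp [pvGroups, pvHsuf]; rfl
  | cons l ls ih =>
    intro d
    by_cases h : pvHdr l
    · rcases pvGroups_cons ls l [] with ⟨e, he⟩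
      cases d with
      | zero =>
        simp only [pvGroups, pvHsuf, h, if_pos, List.drop_zero]
        rw [pvJoinS_flat _ (pvGroups_mem_ne ls [l]), pvGroups_flatten ls l []]
        simp
      | succ d =>
        simp only [pvGroups, pvHsuf, h, if_pos, he, List.drop_succ_cons]
        simpa [he] using ih d
    · simp only [pvGroups, pvHsuf, h, if_neg, Bool.false_eq_true, not_false_iff]
      exact ih d

lemma pvIdx_cons (l : String) (ls : List String) (k : Int) :
    pvIdx (l :: ls) k = if pvHdr l then k :: pvIdx ls (k + 1) else pvIdx ls (k + 1) := by
  by_cases h : pvHdr l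
  · have h' : PySem.Chars.startswith l.toList ['['] = true ∧ PySem.Chars.isIn [']'] l.toList = true := by
      simpa [pvHdr] using h
    simp [pvIdx, PySem.List.enumerate_cons, h, h']
  · have h' : ¬(PySem.Chars.startswith l.toList ['['] = true ∧ PySem.Chars.isIn [']'] l.toList = true) := by
      simpa [pvHdr] using h
    simp [pvIdx, PySem.List.enumerate_cons, h, h']

lemma pvIdx_nonneg : ∀ (ls : List String) (k : Int), 0 ≤ k → ∀ i ∈ pvIdx ls k, 0 ≤ i := by
  intro ls
  induction ls with
  | nil => intro k hk i hi; simp [pvIdx, PySem.List.enumerate] at hi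
  | cons l ls ih =>
    intro k hk i hi
    rw [pvIdx_cons] at hi
    by_cases h : pvHdr l
    · rw [if_pos h] at hi
      rcases List.mem_cons.mp hi with rfl | hi
      · exact hk
      · exact ih (k + 1) (by omega) i hi
    · rw [if_neg h] at hi
      exact ih (k + 1) (by omega) i hi

-- dropping each header index from the full line list gives exactly the header suffixes
lemma pvIdx_map : ∀ (ls : List String) (full : List String) (k : Nat), full.drop k = ls →
    (pvIdx ls (k : Int)).map (fun i => full.drop i.toNat) = pvHsuf ls := by
  intro ls
  induction ls with
  | nil => intro full k hk; simp [pvIdx, PySem.List.enumerate, pvHsuf]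
  | cons l ls ih =>
    intro full k hk
    have hnext : full.drop (k + 1) = ls := by
      rw [← List.tail_drop, hk]
      rfl
    have hcast : (k : Int) + 1 = ((k + 1 : Nat) : Int) := by push_cast; ring
    rw [pvIdx_cons, hcast]
    by_cases h : pvHdr l
    · rw [if_pos h, List.map_cons, ih full (k + 1) hnext]
      simp [pvHsuf, h, Int.toNat_natCast, hk]
    · rw [if_neg h, ih full (k + 1) hnext]
      simp [pvHsuf, h]

lemma pvDropMin {α : Type} (xs : List α) (j : Nat) : xs.drop (min j xs.length) = xs.drop j := by
  rcases le_total j xs.length with h | h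
  · rw [min_eq_left h]
  · rw [min_eq_right h, List.drop_length, List.drop_eq_nil_of_le h]

-- the main line-level equivalence
lemma pvMain (lines : List String) (m : Int) :
    (let st := lines.foldl (fun (s : List String × List String) line =>
        if PySem.Str.startswith line "[" && PySem.Str.isIn "]" line then
          if !s.2.isEmpty then (s.1 ++ [PySem.Str.join "\n" s.2], [line]) else (s.1, [line])
        else if !s.2.isEmpty then (s.1, s.2 ++ [line]) else s) ([], [])
      let entries := if !st.2.isEmpty then st.1 ++ [PySem.Str.join "\n" st.2] else st.1
      let recent := if !entries.isEmpty then PySem.List.slice entries (some (-m)) none else []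
      PySem.Str.join "\n" recent)
    = (let header_indices := (PySem.List.enumerate lines 0).filterMap (fun p =>
          if PySem.Str.startswith p.2 "[" && PySem.Str.isIn "]" p.2 then some p.1 else none)
       let selected := PySem.List.slice header_indices (some (-m)) none
       match selected with
       | [] => ""
       | i :: _ => PySem.Str.join "\n" (PySem.List.slice lines (some i) none)) := by
  have hE := pvA_fold lines [] []
  simp only [List.nil_append] at hE
  simp only []
  rw [hE]
  have hidx : (PySem.List.enumerate lines 0).filterMap (fun p =>
      if PySem.Str.startswith p.2 "[" && PySem.Str.isIn "]" p.2 then some p.1 else none)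
      = pvIdx lines 0 := rfl
  rw [hidx]
  have hmap := pvIdx_map lines lines 0 (by simp)
  rw [Nat.cast_zero] at hmap
  have hlen : ((pvGroups lines []).map (PySem.Str.join "\n")).length = (pvIdx lines (0 : Int)).length := by
    have h1 : (pvIdx lines (0 : Int)).length = (pvHsuf lines).length := by
      rw [← hmap, List.length_map]
    rw [List.length_map, pvGroups_len, h1]
  -- remove A's "if entries nonempty" guard: slicing [] gives [] anyway
  have hIf : (if !((pvGroups lines []).map (PySem.Str.join "\n")).isEmpty
        then PySem.List.slice ((pvGroups lines []).map (PySem.Str.join "\n")) (some (-m)) none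
        else [])
      = List.drop (PySem.List.clampIdx ((pvGroups lines []).map (PySem.Str.join "\n")).length (-m))
          ((pvGroups lines []).map (PySem.Str.join "\n")) := by
    cases hg : (pvGroups lines []).map (PySem.Str.join "\n") with
    | nil => simp
    | cons a t => rw [if_pos (by simp), PySem.List.slice_some_none]
  rw [hIf, hlen]
  rw [PySem.List.slice_some_none]
  set d := PySem.List.clampIdx (pvIdx lines (0 : Int)).length (-m) with hd
  have hdropmap : List.drop d ((pvGroups lines []).map (PySem.Str.join "\n"))
      = ((pvGroups lines []).drop d).map (PySem.Str.join "\n") := by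
    rw [List.map_drop]
  rw [hdropmap, pvL2 lines d]
  have hdropsuf : (pvHsuf lines).drop d = ((pvIdx lines (0 : Int)).drop d).map (fun i => lines.drop i.toNat) := by
    rw [← hmap, List.map_drop]
  cases hsel : (pvIdx lines (0 : Int)).drop d with
  | nil =>
    have : (pvHsuf lines).drop d = [] := by rw [hdropsuf, hsel]; rfl
    rw [this]
  | cons i rest =>
    have hmem : i ∈ pvIdx lines (0 : Int) :=
      List.mem_of_mem_drop (by rw [hsel]; exact List.mem_cons_self ..)
    have hnn : 0 ≤ i := pvIdx_nonneg lines _ (by omega) i hmem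
    have : (pvHsuf lines).drop d = (lines.drop i.toNat) :: rest.map (fun i => lines.drop i.toNat) := by
      rw [hdropsuf, hsel]; rfl
    rw [this]
    have hslice : PySem.List.slice lines (some i) none = lines.drop i.toNat := by
      rw [PySem.List.slice_some_none]
      rw [show i = ((i.toNat : Nat) : Int) from (Int.toNat_of_nonneg hnn).symm]
      rw [PySem.List.clampIdx_natCast]
      exact pvDropMin lines i.toNat
    show PySem.Str.join "\n" (lines.drop i.toNat)
      = PySem.Str.join "\n" (PySem.List.slice lines (some i) none)
    rw [hslice]

-- ===== VERDICT (by name: the statement is the Claim_ definition above) =====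
theorem clean_old_entries_py_spec : Claim_equal_clean_old_entries_py := by
  intro content max_entries _hdom
  unfold Spec_clean_old_entries_py
  exact pvMain ((PySem.Str.split? content "\n").getD []) max_entries
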